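-- pv_equiv track=rewrite | github.com/Re20Cboy/EZchain-under-reconstruction- | EZ_VPB_Validator/Test/test_proof_validator_realistic.py | get_previous_owner_for_block
-- ===== SOURCE A (Python) =====
-- from typing import Dict, List, Set, Tuple, Optional, Any
--
-- def get_previous_owner_for_block(epochs: List[Tuple[int, str]], target_block: int) -> Optional[str]:
--     """获取指定区块的前驱owner地址"""
--     # 找到目标区块在epoch列表中的位置
--     target_index = -1
--     for i, (block_height, owner) in enumerate(epochs):
--         if block_height == target_block:
--             target_index = i
--             break
--
--     if target_index == -1:
--         return None
--
--     # 如果是第一个epoch（创世块），没有前驱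
--     if target_index == 0:
--         return None
--
--     # 返回前一个epoch的owner
--     previous_block, previous_owner = epochs[target_index - 1]
--     return previous_owner
-- ===== SOURCE B (Python) =====
-- from typing import List, Tuple, Optional
--
-- def get_previous_owner_for_block(epochs: List[Tuple[int, str]], target_block: int) -> Optional[str]:
--     # Build an index: block height (first occurrence) -> owner of the epoch before it.
--     # Then answer with a single dict lookup.
--     prev_of = {}
--     prev = None
--     for block_height, owner in epochs:
--         if block_height not in prev_of:
--             prev_of[block_height] = prev
--         prev = owner
--     return prev_of.get(target_block)
-- ===== Notes on version B (the rewrite author's own statement) =====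
-- stated objective: alternative
-- what changed: B builds a hash index mapping each block height (first occurrence) to the owner of the preceding epoch in one pass, then answers by a dict lookup, instead of A's search for the target's index followed by an index-0 guard and backward indexing.
import Mathlib
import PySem

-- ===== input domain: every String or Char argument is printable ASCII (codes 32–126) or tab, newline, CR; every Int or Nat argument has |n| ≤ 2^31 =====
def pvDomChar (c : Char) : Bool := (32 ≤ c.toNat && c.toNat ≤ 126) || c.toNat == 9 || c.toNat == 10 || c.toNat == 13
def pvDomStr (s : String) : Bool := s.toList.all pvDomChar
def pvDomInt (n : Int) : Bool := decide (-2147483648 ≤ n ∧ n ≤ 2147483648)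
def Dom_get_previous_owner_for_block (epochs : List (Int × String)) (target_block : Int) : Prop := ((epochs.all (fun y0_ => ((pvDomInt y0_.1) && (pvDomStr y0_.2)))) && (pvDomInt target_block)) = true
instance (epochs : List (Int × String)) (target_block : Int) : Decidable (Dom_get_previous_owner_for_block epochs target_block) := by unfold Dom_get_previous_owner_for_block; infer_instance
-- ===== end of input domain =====

-- B builds a dict indexing each block height (first occurrence) to the preceding epoch's owner, then answers by one lookup, instead of A's index search with back-indexing (objective: alternative).


-- ===== PORT A =====
-- the enumerate loop with break: first index whose block_height equals target_block
def pvFindIdxA (epochs : List (Int × String)) (target_block : Int) : Option Nat :=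
  match epochs with
  | [] => none
  | (block_height, _owner) :: rest =>
      if block_height = target_block then some 0
      else (pvFindIdxA rest target_block).map (· + 1)

def get_previous_owner_for_block (epochs : List (Int × String)) (target_block : Int) : Option String :=
  match pvFindIdxA epochs target_block with
  | none => none                      -- target_index == -1
  | some 0 => none                    -- target_index == 0
  | some (i + 1) =>                   -- epochs[target_index - 1]
      match PySem.List.pyGet? epochs ((i : Int) + 1 - 1) with
      | some (_previous_block, previous_owner) => some previous_owner
      | none => none                  -- unreachable: index always in range

-- ===== PORT B =====
-- the building loop: 'if block_height not in prev_of: prev_of[block_height] = prev; prev = owner'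
def pvBuild (d : PySem.Dict Int (Option String)) (prev : Option String) (epochs : List (Int × String)) : PySem.Dict Int (Option String) :=
  match epochs with
  | [] => d
  | (block_height, owner) :: rest =>
      pvBuild (if d.contains block_height then d else d.insert block_height prev) (some owner) rest

def get_previous_owner_for_block_alt (epochs : List (Int × String)) (target_block : Int) : Option String :=
  match (pvBuild PySem.Dict.empty none epochs).get? target_block with   -- prev_of.get(target_block)
  | some v => v
  | none => none

-- ===== PRECONDITION & SPEC =====
def Spec_get_previous_owner_for_block (epochs : List (Int × String)) (target_block : Int) (out : Option String) : Prop := out = get_previous_owner_for_block_alt epochs target_block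
instance (epochs : List (Int × String)) (target_block : Int) (out : Option String) : Decidable (Spec_get_previous_owner_for_block epochs target_block out) := by unfold Spec_get_previous_owner_for_block; infer_instance

-- ===== CLAIM (what is proved, stated in full; the proofs are below) =====
def Claim_equal_get_previous_owner_for_block : Prop := ∀ (epochs : List (Int × String)) (target_block : Int), Dom_get_previous_owner_for_block epochs target_block → Spec_get_previous_owner_for_block epochs target_block (get_previous_owner_for_block epochs target_block)

-- ===== LEMMAS AND PROOFS =====

-- the common characterisation: the value recorded for the FIRST epoch whose height is t,
-- given that `prev` is the owner of the epoch before the list (none at the start)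
def pvG (epochs : List (Int × String)) (prev : Option String) (t : Int) : Option (Option String) :=
  match epochs with
  | [] => none
  | (h, o) :: rest => if h = t then some prev else pvG rest (some o) t

-- A's body with the index-0 return value abstracted as `prev`
def pvStepA (prev : Option String) (epochs : List (Int × String)) (target_block : Int) : Option String :=
  match pvFindIdxA epochs target_block with
  | none => none
  | some 0 => prev
  | some (i + 1) =>
      match PySem.List.pyGet? epochs ((i : Int) + 1 - 1) with
      | some (_, previous_owner) => some previous_owner
      | none => none

theorem pvStepA_eq_g (epochs : List (Int × String)) (t : Int) :
    ∀ prev, pvStepA prev epochs t = (pvG epochs prev t).getD none := by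
  induction epochs with
  | nil => intro prev; rfl
  | cons hd tl ih =>
    intro prev
    obtain ⟨h, o⟩ := hd
    by_cases hb : h = t
    · simp [pvStepA, pvG, pvFindIdxA, hb]
    · rw [pvG]
      simp only [hb, if_false]
      rw [← ih (some o)]
      unfold pvStepA
      rw [pvFindIdxA]
      simp only [hb, if_false]
      cases hf : pvFindIdxA tl t with
      | none => simp
      | some j =>
        cases j with
        | zero =>
          simp [PySem.List.pyGet?, PySem.List.pyIdx?]
        | succ k =>
          have h2 : ((k : Int) + 1 - 1) = ((k : Nat) : Int) := by ring
          simp only [Option.map_some, h2, PySem.List.pyGet?_natCast]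
          simp

theorem pvBuild_get (epochs : List (Int × String)) (t : Int) :
    ∀ (d : PySem.Dict Int (Option String)) (prev : Option String),
      (pvBuild d prev epochs).get? t =
        match d.get? t with
        | some v => some v
        | none => pvG epochs prev t := by
  induction epochs with
  | nil => intro d prev; cases hd : d.get? t <;> simp [pvBuild, pvG, hd]
  | cons hd tl ih =>
    intro d prev
    obtain ⟨h, o⟩ := hd
    rw [pvBuild, ih]
    by_cases hc : d.contains h = true
    · simp only [hc, if_true]
      cases hd : d.get? t with
      | some v => simp
      | none =>
        have hne : h ≠ t := by
          intro he
          rw [PySem.Dict.contains_eq_isSome_get?, he, hd] at hc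
          simp at hc
        simp [pvG, hne]
    · simp only [Bool.not_eq_true] at hc
      simp only [hc, Bool.false_eq_true, if_false]
      rw [PySem.Dict.get?_insert]
      by_cases he : t = h
      · subst he
        have hd : d.get? t = none := by
          rw [PySem.Dict.contains_eq_isSome_get?] at hc
          cases hx : d.get? t with
          | none => rfl
          | some v => rw [hx] at hc; simp at hc
        simp [hd, pvG]
      · have he' : h ≠ t := fun hx => he hx.symm
        simp only [he, if_false]
        cases d.get? t with
        | some v => simp
        | none => simp [pvG, he']

theorem get_previous_owner_for_block_spec : Claim_equal_get_previous_owner_for_block := by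
  intro epochs target_block _
  show get_previous_owner_for_block epochs target_block = get_previous_owner_for_block_alt epochs target_block
  have hA : get_previous_owner_for_block epochs target_block = (pvG epochs none target_block).getD none := by
    have := pvStepA_eq_g epochs target_block none
    unfold pvStepA at this
    unfold get_previous_owner_for_block
    exact this
  have hB := pvBuild_get epochs target_block PySem.Dict.empty none
  rw [PySem.Dict.get?_empty] at hB
  unfold get_previous_owner_for_block_alt
  rw [hB, hA]
  cases pvG epochs none target_block with
  | none => rfl
  | some v => rfl
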